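-- pv_equiv track=rewrite | github.com/nelsonlai/freelance | leetcode/leetcode_problems/codes/1933_check-if-string-is-decomposable-into-value-equal-substrings/python3.py | isDecomposable
-- ===== SOURCE A (Python) =====
-- def isDecomposable(s: str) -> int:
--     i = 0
--     n = len(s)
--     has_two = False
--
--     while i < n:
--         if i + 2 < n and s[i] == s[i+1] == s[i+2]:
--             i += 3
--         elif i + 1 < n and s[i] == s[i+1]:
--             if has_two:
--                 return False
--             has_two = True
--             i += 2
--         else:
--             return False
--
--     return has_two
-- ===== SOURCE B (Python) =====
-- from itertools import groupby
--
-- def isDecomposable(s: str) -> int: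
--     twos = 0
--     for _, grp in groupby(s):
--         run = sum(1 for _ in grp)
--         if run % 3 == 1:
--             return False
--         if run % 3 == 2:
--             twos += 1
--     return twos == 1
-- ===== Notes on version B (the rewrite author's own statement) =====
-- stated objective: idiomatic
-- what changed: Replaces the greedy index-advancing state machine with run-length encoding (itertools.groupby) plus modular arithmetic: fail if any run length %3==1, succeed iff exactly one run has length %3==2.
import Mathlib
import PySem

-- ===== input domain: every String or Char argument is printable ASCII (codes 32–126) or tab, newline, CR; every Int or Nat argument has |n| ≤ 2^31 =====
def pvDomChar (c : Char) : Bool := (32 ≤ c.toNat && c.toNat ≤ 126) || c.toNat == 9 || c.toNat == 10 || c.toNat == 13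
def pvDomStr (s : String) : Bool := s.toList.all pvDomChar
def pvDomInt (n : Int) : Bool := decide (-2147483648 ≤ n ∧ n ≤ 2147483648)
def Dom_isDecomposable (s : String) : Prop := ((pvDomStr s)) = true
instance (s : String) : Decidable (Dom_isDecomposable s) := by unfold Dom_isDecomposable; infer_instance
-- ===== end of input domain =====

-- B replaces A's greedy index-advancing state machine by a run-length-encoding pass
-- plus modular arithmetic (idiomatic; same cost).

-- ===== PORT A =====
-- A's while loop over index i, with state (i, has_two); decreasing measure n - i.
def pvALoop (cs : List Char) (i : Nat) (hasTwo : Bool) : Bool :=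
  if i < cs.length then
    if i + 2 < cs.length ∧ cs[i]? = cs[i+1]? ∧ cs[i+1]? = cs[i+2]? then
      pvALoop cs (i+3) hasTwo
    else if i + 1 < cs.length ∧ cs[i]? = cs[i+1]? then
      if hasTwo then false else pvALoop cs (i+2) true
    else false
  else hasTwo
termination_by cs.length - i

def isDecomposable (s : String) : Bool := pvALoop s.toList 0 false

-- ===== PORT B =====
-- groupby: run lengths of maximal blocks of equal consecutive characters.
def pvRleGo (cs : List Char) (cur : Char) (k : Nat) : List Nat :=
  match cs with
  | [] => [k]
  | c :: rest => if c = cur then pvRleGo rest cur (k+1) else k :: pvRleGo rest c 1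

def pvRle (cs : List Char) : List Nat :=
  match cs with
  | [] => []
  | c :: rest => pvRleGo rest c 1

-- B's for loop over the run lengths, counting runs with length % 3 == 2.
def pvBLoop (runs : List Nat) (twos : Nat) : Bool :=
  match runs with
  | [] => twos == 1
  | L :: rest =>
    if L % 3 = 1 then false
    else pvBLoop rest (if L % 3 = 2 then twos + 1 else twos)

def isDecomposable_alt (s : String) : Bool := pvBLoop (pvRle s.toList) 0

-- ===== PRECONDITION & SPEC =====
def Spec_isDecomposable (s : String) (out : Bool) : Prop := out = isDecomposable_alt s
instance (s : String) (out : Bool) : Decidable (Spec_isDecomposable s out) := by unfold Spec_isDecomposable; infer_instance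

-- ===== CLAIM (what is proved, stated in full; the proofs are below) =====
def Claim_equal_isDecomposable : Prop := ∀ (s : String), Dom_isDecomposable s → Spec_isDecomposable s (isDecomposable s)

-- ===== LEMMAS AND PROOFS =====

-- Structural version of A's greedy loop, acting on the suffix cs.drop i.
def pvG : List Char → Bool → Bool
  | a :: b :: c :: rest, h =>
    if a = b ∧ b = c then pvG rest h
    else if a = b then (if h then false else pvG (c :: rest) true)
    else false
  | [a, b], h => if a = b then (if h then false else pvG [] true) else false
  | [_], _ => false
  | [], h => h

-- pvALoop equals pvG on the dropped suffix.
theorem pvALoop_eq_pvG (cs : List Char) (i : Nat) (h : Bool) :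
    pvALoop cs i h = pvG (cs.drop i) h := by
  induction hm : cs.length - i using Nat.strong_induction_on generalizing i h with
  | _ m IH =>
  subst hm
  rw [pvALoop]
  rcases hd : cs.drop i with _ | ⟨a, _ | ⟨b, _ | ⟨c, rest⟩⟩⟩
  · have hni : ¬ i < cs.length := by
      intro hlt
      have := List.drop_eq_nil_iff.mp hd
      omega
    rw [if_neg hni]
    rfl
  · -- drop i = [a]
    have hlen : cs.length = i + 1 := by
      have := congrArg List.length hd
      simp [List.length_drop] at this
      omega
    have hlt : i < cs.length := by omega
    have c3 : ¬ (i + 2 < cs.length ∧ cs[i]? = cs[i+1]? ∧ cs[i+1]? = cs[i+2]?) := by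
      rintro ⟨w, -⟩; omega
    have c2 : ¬ (i + 1 < cs.length ∧ cs[i]? = cs[i+1]?) := by
      rintro ⟨w, -⟩; omega
    rw [if_pos hlt, if_neg c3, if_neg c2]
    simp [pvG]
  · -- drop i = [a, b]
    have hlen : cs.length = i + 2 := by
      have := congrArg List.length hd
      simp [List.length_drop] at this
      omega
    have hga : cs[i]? = some a := by
      have := congrArg (fun l => l[0]?) hd
      simpa [List.getElem?_drop] using this
    have hgb : cs[i+1]? = some b := by
      have := congrArg (fun l => l[1]?) hd
      simpa [List.getElem?_drop] using this
    have hlt : i < cs.length := by omega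
    have h2 : i + 1 < cs.length := by omega
    have c3 : ¬ (i + 2 < cs.length ∧ cs[i]? = cs[i+1]? ∧ cs[i+1]? = cs[i+2]?) := by
      rintro ⟨w, -⟩; omega
    have hdrop2 : cs.drop (i+2) = ([] : List Char) := by
      apply List.drop_eq_nil_iff.mpr; omega
    rw [if_pos hlt, if_neg c3]
    by_cases hab : a = b
    · subst hab
      have e1 : cs[i]? = cs[i+1]? := by rw [hga, hgb]
      rw [if_pos ⟨h2, e1⟩]
      cases h with
      | true => simp [pvG]
      | false =>
        rw [IH (cs.length - (i+2)) (by omega) (i+2) true rfl, hdrop2]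
        simp [pvG]
    · have c2 : ¬ (i + 1 < cs.length ∧ cs[i]? = cs[i+1]?) := by
        rintro ⟨-, e⟩
        rw [hga, hgb] at e
        exact hab (by injection e)
      rw [if_neg c2]
      simp [pvG, hab]
  · -- drop i = a :: b :: c :: rest
    have hlen : i + 3 ≤ cs.length := by
      have := congrArg List.length hd
      simp [List.length_drop] at this
      omega
    have hga : cs[i]? = some a := by
      have := congrArg (fun l => l[0]?) hd
      simpa [List.getElem?_drop] using this
    have hgb : cs[i+1]? = some b := by
      have := congrArg (fun l => l[1]?) hd
      simpa [List.getElem?_drop] using this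
    have hgc : cs[i+2]? = some c := by
      have := congrArg (fun l => l[2]?) hd
      simpa [List.getElem?_drop, Nat.add_assoc] using this
    have hlt : i < cs.length := by omega
    have h2 : i + 2 < cs.length := by omega
    have h1 : i + 1 < cs.length := by omega
    have hdrop3 : cs.drop (i+3) = rest := by
      have := congrArg (List.drop 3) hd
      simpa [List.drop_drop, Nat.add_comm] using this
    have hdrop2 : cs.drop (i+2) = c :: rest := by
      have := congrArg (List.drop 2) hd
      simpa [List.drop_drop, Nat.add_comm] using this
    rw [if_pos hlt]
    by_cases habc : a = b ∧ b = c
    · obtain ⟨rfl, rfl⟩ := habc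
      have e1 : cs[i]? = cs[i+1]? := by rw [hga, hgb]
      have e2 : cs[i+1]? = cs[i+2]? := by rw [hgb, hgc]
      rw [if_pos ⟨h2, e1, e2⟩, IH (cs.length - (i+3)) (by omega) (i+3) h rfl, hdrop3]
      simp [pvG]
    · have c3 : ¬ (i + 2 < cs.length ∧ cs[i]? = cs[i+1]? ∧ cs[i+1]? = cs[i+2]?) := by
        rintro ⟨-, u, v⟩
        rw [hga, hgb] at u
        rw [hgb, hgc] at v
        exact habc ⟨by injection u, by injection v⟩
      rw [if_neg c3]
      by_cases hab : a = b
      · subst hab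
        have hac : a ≠ c := fun e => habc ⟨rfl, e⟩
        have e1 : cs[i]? = cs[i+1]? := by rw [hga, hgb]
        rw [if_pos ⟨h1, e1⟩]
        cases h with
        | true => simp [pvG, hac]
        | false =>
          rw [IH (cs.length - (i+2)) (by omega) (i+2) true rfl, hdrop2]
          simp [pvG, hac]
      · have c2 : ¬ (i + 1 < cs.length ∧ cs[i]? = cs[i+1]?) := by
          rintro ⟨-, e⟩
          rw [hga, hgb] at e
          exact hab (by injection e)
        rw [if_neg c2]
        simp [pvG, hab]

-- Closed form both loops reduce to: no run ≡1 (mod 3), and twos + #(runs ≡2) = 1.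
theorem pvBLoop_closed (rs : List Nat) (t : Nat) :
    pvBLoop rs t = ((rs.all (fun L => ! (L % 3 == 1))) && (t + (rs.countP (fun L => L % 3 == 2)) == 1)) := by
  induction rs generalizing t with
  | nil => simp [pvBLoop]
  | cons L rest IH =>
    rw [pvBLoop]
    simp only [List.all_cons, List.countP_cons]
    by_cases h1 : L % 3 = 1
    · simp [h1]
    · have hb : (!(L % 3 == 1)) = true := by simp [h1]
      rw [if_neg h1, hb, Bool.true_and]
      by_cases h2 : L % 3 = 2
      · rw [if_pos h2, IH]
        have e : (if (L % 3 == 2) = true then 1 else 0) = 1 := by simp [h2]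
        rw [e]
        have e2 : t + 1 + List.countP (fun L => L % 3 == 2) rest
            = t + (List.countP (fun L => L % 3 == 2) rest + 1) := by omega
        rw [e2]
      · rw [if_neg h2, IH]
        have e : (if (L % 3 == 2) = true then 1 else 0) = 0 := by simp [h2]
        rw [e, Nat.add_zero]

-- g on a run of length k (followed by a block starting with a different char).
theorem pvG_run (k : Nat) (c : Char) (rest : List Char)
    (hne : ∀ d, rest.head? = some d → d ≠ c) :
    ∀ (h : Bool), 1 ≤ k →
    pvG (List.replicate k c ++ rest) h =
      (if k % 3 = 1 then false
       else if k % 3 = 2 then (if h then false else pvG rest true)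
       else pvG rest h) := by
  induction k using Nat.strong_induction_on with
  | _ k IH =>
  intro h hk
  rcases k with _ | (_ | (_ | m))
  · omega
  · -- k = 1
    rcases rest with _ | ⟨d, _ | ⟨e, r⟩⟩
    · simp [pvG]
    · have hd : d ≠ c := hne d rfl
      simp [pvG, hd.symm]
    · have hd : d ≠ c := hne d rfl
      simp [pvG, hd.symm]
  · -- k = 2
    rcases rest with _ | ⟨d, r⟩
    · simp [pvG]
    · have hd : d ≠ c := hne d rfl
      simp [pvG, hd.symm]
  · -- k = m + 3
    have hrep : List.replicate (m+3) c ++ rest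
        = c :: c :: c :: (List.replicate m c ++ rest) := by
      simp [List.replicate_succ]
    have hmod : (m + 3) % 3 = m % 3 := by omega
    show pvG (List.replicate (m+3) c ++ rest) h = _
    rw [hrep, pvG, if_pos ⟨rfl, rfl⟩, hmod]
    rcases Nat.eq_zero_or_pos m with hm0 | hmpos
    · subst hm0
      simp
    · rw [IH m (by omega) h hmpos]

-- rleGo over a run of length m of cur, starting from accumulated count j.
theorem pvRleGo_run (m : Nat) (c : Char) (rest : List Char) (j : Nat)
    (hne : ∀ d, rest.head? = some d → d ≠ c) :
    pvRleGo (List.replicate m c ++ rest) c j = (j + m) :: pvRle rest := by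
  induction m generalizing j with
  | zero =>
    rcases rest with _ | ⟨d, r⟩
    · simp [pvRleGo, pvRle]
    · have hd : d ≠ c := hne d rfl
      simp [pvRleGo, pvRle, hd]
  | succ m IH =>
    simp only [List.replicate_succ, List.cons_append, pvRleGo]
    rw [IH (j+1)]
    have e : j + 1 + m = j + (m + 1) := by omega
    rw [e, if_pos trivial]

-- Structural greedy loop equals B's loop lifted to a boolean flag.
def pvGB (rs : List Nat) (h : Bool) : Bool :=
  match rs with
  | [] => h
  | L :: rest =>
    if L % 3 = 1 then false
    else if L % 3 = 2 then (if h then false else pvGB rest true)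
    else pvGB rest h

theorem pvGB_closed (rs : List Nat) (h : Bool) :
    pvGB rs h = ((rs.all (fun L => ! (L % 3 == 1))) && ((cond h 1 0) + (rs.countP (fun L => L % 3 == 2)) == 1)) := by
  induction rs generalizing h with
  | nil => cases h <;> simp [pvGB]
  | cons L rest IH =>
    rw [pvGB]
    simp only [List.all_cons, List.countP_cons]
    by_cases h1 : L % 3 = 1
    · simp [h1]
    · have hb : (!(L % 3 == 1)) = true := by simp [h1]
      rw [if_neg h1, hb, Bool.true_and]
      by_cases h2 : L % 3 = 2
      · have e : (if (L % 3 == 2) = true then 1 else 0) = 1 := by simp [h2]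
        rw [if_pos h2, e]
        cases h with
        | true =>
          rw [if_pos rfl]
          have e3 : (1 + (List.countP (fun L => L % 3 == 2) rest + 1) == 1) = false := by
            simp
          rw [Bool.cond_true, e3, Bool.and_false]
        | false =>
          rw [if_neg Bool.false_ne_true, IH, Bool.cond_true, Bool.cond_false]
          have e2 : 1 + List.countP (fun L => L % 3 == 2) rest
              = 0 + (List.countP (fun L => L % 3 == 2) rest + 1) := by omega
          rw [e2]
      · have e : (if (L % 3 == 2) = true then 1 else 0) = 0 := by simp [h2]
        rw [if_neg h2, IH, e, Nat.add_zero]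

theorem pvG_eq_pvGB (cs : List Char) (h : Bool) :
    pvG cs h = pvGB (pvRle cs) h := by
  induction hm : cs.length using Nat.strong_induction_on generalizing cs h with
  | _ m IH =>
  subst hm
  rcases cs with _ | ⟨c, tail⟩
  · simp [pvG, pvRle, pvGB]
  · -- peel the leading run of c
    set k := (List.takeWhile (fun x => x = c) (c :: tail)).length with hk
    set rest := List.dropWhile (fun x => x = c) (c :: tail) with hrest
    have hsplit : c :: tail = List.replicate k c ++ rest := by
      conv_lhs => rw [← List.takeWhile_append_dropWhile (p := fun x => x = c) (l := c :: tail)]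
      congr 1
      apply List.eq_replicate_of_mem
      intro b hb
      have := List.mem_takeWhile_imp hb
      simpa using this
    have hk1 : 1 ≤ k := by
      rw [hk]
      simp
    have hne : ∀ d, rest.head? = some d → d ≠ c := by
      intro d hd
      have := List.head?_dropWhile_not (p := fun x => x = c) (l := c :: tail)
      rw [← hrest, hd] at this
      simpa using this
    have hlenrest : rest.length < (c :: tail).length := by
      have h5 : (c :: tail).length = k + rest.length := by
        conv_lhs => rw [hsplit]
        simp
      omega
    have hrle : pvRle (c :: tail) = k :: pvRle rest := by
      rw [hsplit]
      match k, hk1 with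
      | (n+1), _ =>
        simp only [List.replicate_succ, List.cons_append, pvRle]
        rw [pvRleGo_run n c rest 1 hne]
        congr 1
        omega
    rw [hrle, pvGB]
    conv_lhs => rw [hsplit]
    rw [pvG_run k c rest hne h hk1]
    by_cases h1 : k % 3 = 1
    · simp [h1]
    · by_cases h2 : k % 3 = 2
      · simp only [h1, if_neg, h2, if_pos rfl, if_neg h1]
        cases h with
        | true => simp
        | false =>
          simp only [if_neg (Bool.false_ne_true)]
          exact IH rest.length (by simpa using hlenrest) rest true rfl
      · simp only [if_neg h1, if_neg h2]
        exact IH rest.length (by simpa using hlenrest) rest h rfl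

-- ===== VERDICT (by name: the statement is the Claim_ definition above) =====
theorem isDecomposable_spec : Claim_equal_isDecomposable := by
  intro s _
  unfold Spec_isDecomposable isDecomposable isDecomposable_alt
  rw [pvALoop_eq_pvG, List.drop_zero, pvG_eq_pvGB, pvGB_closed, pvBLoop_closed]
  rfl
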